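-- pv_equiv track=rewrite | github.com/posl/comment_recommendation | script/split_gen/4_time/zh/285_D/8.py | check
-- ===== SOURCE A (Python) =====
-- def check(s, t):
--     if len(s) != len(t):
--         return False
--     if s == t:
--         return False
--     s_count = {}
--     t_count = {}
--     for i in range(len(s)):
--         if s[i] not in s_count:
--             s_count[s[i]] = 1
--         else:
--             s_count[s[i]] += 1
--         if t[i] not in t_count:
--             t_count[t[i]] = 1
--         else:
--             t_count[t[i]] += 1
--     for i in range(len(s)):
--         if s_count[s[i]] != t_count[s[i]]:
--             return False
--         if s_count[t[i]] != t_count[t[i]]: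
--             return False
--     return True
-- ===== SOURCE B (Python) =====
-- def check(s, t):
--     return s != t and sorted(s) == sorted(t)
-- ===== Notes on version B (the rewrite author's own statement) =====
-- stated objective: simpler
-- what changed: B replaces the two hand-built frequency dictionaries and the per-index verification loop with a one-line sort-and-compare: s != t and sorted(s) == sorted(t).
import Mathlib
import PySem

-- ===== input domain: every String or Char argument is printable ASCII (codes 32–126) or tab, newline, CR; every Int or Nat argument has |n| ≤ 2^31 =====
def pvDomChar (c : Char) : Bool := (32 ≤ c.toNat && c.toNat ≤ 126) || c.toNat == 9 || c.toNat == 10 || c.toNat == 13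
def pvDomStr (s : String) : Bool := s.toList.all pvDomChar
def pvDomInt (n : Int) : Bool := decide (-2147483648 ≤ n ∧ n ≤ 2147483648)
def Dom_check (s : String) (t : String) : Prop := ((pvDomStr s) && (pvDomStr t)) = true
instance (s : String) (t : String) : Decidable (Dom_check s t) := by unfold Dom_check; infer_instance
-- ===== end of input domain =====

-- B replaces A's two frequency dictionaries and verification loop with sort-and-compare (simpler; return value only, neither mutates).

-- ===== PORT A =====
-- 'if s[i] not in s_count: s_count[s[i]] = 1 else: s_count[s[i]] += 1' (and the same for t)
def checkStepA (d : PySem.Dict Char Int) (c : Char) : PySem.Dict Char Int :=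
  if d.contains c = false then d.insert c 1 else d.modify c 0 (· + 1)

-- the second 'for i in range(len(s))' loop with its early returns; the Python raises KeyError
-- when a looked-up char is missing (Pre_check excludes exactly those inputs), here getD 0 stands in.
def checkLoop2 (sc tc : PySem.Dict Char Int) (cs ct : List Char) : List Nat → Bool
  | [] => true
  | i :: rest =>
    if sc.getD (cs.getD i ' ') 0 ≠ tc.getD (cs.getD i ' ') 0 then false
    else if sc.getD (ct.getD i ' ') 0 ≠ tc.getD (ct.getD i ' ') 0 then false
    else checkLoop2 sc tc cs ct rest

def check (s : String) (t : String) : Bool :=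
  let cs := s.toList
  let ct := t.toList
  if cs.length ≠ ct.length then false
  else if s = t then false
  else
    let p := (List.range cs.length).foldl
      (fun (p : PySem.Dict Char Int × PySem.Dict Char Int) i =>
        (checkStepA p.1 (cs.getD i ' '), checkStepA p.2 (ct.getD i ' ')))
      (PySem.Dict.empty, PySem.Dict.empty)
    checkLoop2 p.1 p.2 cs ct (List.range cs.length)

-- ===== PORT B =====
-- return s != t and sorted(s) == sorted(t)
def check_alt (s : String) (t : String) : Bool :=
  decide (s ≠ t) &&
    decide ((PySem.List.sorted s.toList (fun x => x)) = PySem.List.sorted t.toList (fun x => x))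

-- ===== PRECONDITION & SPEC =====
-- Characterisation (on the INPUT, via counts and membership only) of exactly the inputs on
-- which Python's A raises KeyError: same-length unequal strings where, at the FIRST index i at
-- which A's verification loop would stop, the stop is a missing dictionary key (s[i] not a key
-- of t_count, or — after an equal-count check on s[i] — t[i] not a key of s_count) rather than
-- a count mismatch.  checkRaiseStop / checkRaiseKey restate A's per-index stop/raise tests as
-- count/membership facts about the two strings; they do not run either port.
def checkRaiseStop (cs ct : List Char) (i : Nat) : Bool :=
  !(ct.contains (cs.getD i ' ')) || (cs.count (cs.getD i ' ') != ct.count (cs.getD i ' '))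
  || !(cs.contains (ct.getD i ' ')) || (cs.count (ct.getD i ' ') != ct.count (ct.getD i ' '))

def checkRaiseKey (cs ct : List Char) (i : Nat) : Bool :=
  !(ct.contains (cs.getD i ' '))
  || ((cs.count (cs.getD i ' ') == ct.count (cs.getD i ' ')) && !(cs.contains (ct.getD i ' ')))

def checkRaises (s t : String) : Bool :=
  (s.toList.length == t.toList.length) && (s != t) &&
    (match (List.range s.toList.length).find? (checkRaiseStop s.toList t.toList) with
     | some i => checkRaiseKey s.toList t.toList i
     | none => false)

-- Pre_check excludes exactly the inputs on which Python's A raises KeyError; on every input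
-- where A returns a value, Pre_check holds.
def Pre_check (s : String) (t : String) : Prop := checkRaises s t = false
instance (s : String) (t : String) : Decidable (Pre_check s t) := by
  unfold Pre_check; infer_instance

def pvWitness_check : String × String := ("ab", "ba")

def Spec_check (s : String) (t : String) (out : Bool) : Prop := out = check_alt s t
instance (s : String) (t : String) (out : Bool) : Decidable (Spec_check s t out) := by
  unfold Spec_check; infer_instance

-- ===== CLAIM (what is proved, stated in full; the proofs are below) =====
def Claim_equal_check : Prop :=
  ∀ (s : String) (t : String), Dom_check s t → Pre_check s t → Spec_check s t (check s t)

-- ===== LEMMAS AND PROOFS =====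

theorem checkStepA_eq_modify : checkStepA = fun d c => d.modify c 0 (· + 1) := by
  funext d c
  unfold checkStepA
  split_ifs with h
  · have h0 : d.getD c 0 = 0 := by
      simp [PySem.Dict.getD, (PySem.Dict.get?_eq_none_iff_contains d c).mpr h]
    simp [PySem.Dict.modify, h0]
  · rfl

theorem map_range_getD (l : List Char) (m : Nat) (hm : m = l.length) :
    (List.range m).map (fun i => l.getD i ' ') = l := by
  subst hm
  apply List.ext_getElem
  · simp
  · intro i h1 h2
    simp only [List.getElem_map, List.getElem_range]
    rw [List.getD_eq_getElem?_getD, List.getElem?_eq_getElem h2]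
    rfl

theorem foldl_range_counter (l : List Char) (m : Nat) (hm : m = l.length) :
    (List.range m).foldl (fun d i => checkStepA d (l.getD i ' ')) PySem.Dict.empty
      = PySem.Dict.counter l := by
  rw [checkStepA_eq_modify]
  calc (List.range m).foldl (fun (d : PySem.Dict Char Int) i => d.modify (l.getD i ' ') 0 (· + 1))
        PySem.Dict.empty
      = ((List.range m).map (fun i => l.getD i ' ')).foldl
          (fun (d : PySem.Dict Char Int) c => d.modify c 0 (· + 1)) PySem.Dict.empty :=
        by rw [List.foldl_map]
    _ = l.foldl (fun (d : PySem.Dict Char Int) c => d.modify c 0 (· + 1)) PySem.Dict.empty := by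
        rw [map_range_getD l m hm]
    _ = PySem.Dict.counter l := rfl

theorem checkLoop2_all (sc tc : PySem.Dict Char Int) (cs ct : List Char) (l : List Nat) :
    checkLoop2 sc tc cs ct l
      = l.all (fun i =>
          decide (sc.getD (cs.getD i ' ') 0 = tc.getD (cs.getD i ' ') 0) &&
          decide (sc.getD (ct.getD i ' ') 0 = tc.getD (ct.getD i ' ') 0)) := by
  induction l with
  | nil => rfl
  | cons i rest ih =>
    simp [checkLoop2, ih, Bool.and_assoc]

theorem getD_lt (l : List Char) (i : Nat) (h : i < l.length) : l.getD i ' ' = l[i] := by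
  rw [List.getD_eq_getElem?_getD, List.getElem?_eq_getElem h]; rfl

-- ===== VERDICT (by name: the statement is the Claim_ definition above) =====
theorem check_spec : Claim_equal_check := by
  intro s t _ _
  unfold Spec_check check check_alt
  simp only []
  by_cases hlen : s.toList.length = t.toList.length
  · by_cases hst : s = t
    · subst hst
      simp
    · -- main branch: lengths equal, s ≠ t
      rw [if_neg (by simp [hlen]), if_neg hst]
      rw [PySem.List.foldl_prod_mk (fun d i => checkStepA d (s.toList.getD i ' '))
            (fun d i => checkStepA d (t.toList.getD i ' ')),
          foldl_range_counter s.toList _ rfl,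
          foldl_range_counter t.toList _ hlen, checkLoop2_all]
      have hd : decide (s ≠ t) = true := by simp [hst]
      rw [hd, Bool.true_and, Bool.eq_iff_iff]
      rw [decide_eq_true_iff,
          PySem.List.sorted_id_eq_sorted_id_iff_perm s.toList t.toList,
          List.perm_iff_count, List.all_eq_true]
      constructor
      · intro h c
        by_cases hc : c ∈ s.toList
        · obtain ⟨i, hi, hci⟩ := List.mem_iff_getElem.mp hc
          have := h i (List.mem_range.mpr hi)
          rw [getD_lt s.toList i hi, hci] at this
          have h1 := (Bool.and_eq_true _ _).mp this |>.1
          rw [decide_eq_true_iff, PySem.Dict.getD_counter, PySem.Dict.getD_counter] at h1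
          exact_mod_cast h1
        · by_cases hct : c ∈ t.toList
          · obtain ⟨i, hi, hci⟩ := List.mem_iff_getElem.mp hct
            have hi' : i < s.toList.length := by omega
            have := h i (List.mem_range.mpr hi')
            rw [getD_lt t.toList i hi, hci] at this
            have h2 := (Bool.and_eq_true _ _).mp this |>.2
            rw [decide_eq_true_iff, PySem.Dict.getD_counter, PySem.Dict.getD_counter] at h2
            exact_mod_cast h2
          · rw [List.count_eq_zero_of_not_mem hc, List.count_eq_zero_of_not_mem hct]
      · intro h i _
        simp only [PySem.Dict.getD_counter, Bool.and_eq_true, decide_eq_true_iff]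
        exact ⟨by exact_mod_cast h (s.toList.getD i ' '),
               by exact_mod_cast h (t.toList.getD i ' ')⟩
  · -- lengths differ: both sides false
    rw [if_pos hlen]
    have hst : s ≠ t := fun h => hlen (by rw [h])
    have : ¬ (PySem.List.sorted s.toList (fun x => x) = PySem.List.sorted t.toList (fun x => x)) := by
      intro h
      exact hlen ((PySem.List.sorted_id_eq_sorted_id_iff_perm s.toList t.toList).mp h).length_eq
    simp [this]
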